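-- pv_equiv track=rewrite | github.com/jayhyun-hwang/jhLeetCode | python-code/programmers/L3/불량사용자.py | solution
-- ===== SOURCE A (Python) =====
-- def is_match(t_id, pattern):
--     l = len(t_id)
--     if l != len(pattern):
--         return False
--     for i in range(l):
--         if pattern[i] == '*':
--             continue
--         if t_id[i] != pattern[i]:
--             return False
--     return True
--
-- def make_res(m_list, depth_idx, res_set, res_list):
--     if depth_idx >= len(m_list):
--         for r in res_list:
--             if r == res_set:
--                 return
--         res_list.append(res_set)
--         return
--     for ele in m_list[depth_idx]:
--         if depth_idx < 1:
--             res_set = set()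
--         if ele in res_set:
--             continue
--         new_set = res_set.copy()
--         new_set.add(ele)
--         make_res(m_list, depth_idx + 1, new_set, res_list)
--
-- def solution(user_id, banned_id):
--     answer = 0
--
--     match_list = []
--     for idx, b in enumerate(banned_id):
--         for val in user_id:
--             if is_match(val, b):
--                 if idx >= len(match_list):
--                     match_list.append([])
--                 match_list[idx].append(val)
--     res_list = []
--     make_res(match_list, 0, set(), res_list)
--     answer = len(res_list)
--
--     return answer
-- ===== SOURCE B (Python) =====
-- def is_match(t_id, pattern):
--     return len(t_id) == len(pattern) and all(
--         p == '*' or c == p for c, p in zip(t_id, pattern))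
--
-- def solution(user_id, banned_id):
--     match_list = []
--     for idx, b in enumerate(banned_id):
--         for val in user_id:
--             if is_match(val, b):
--                 if idx >= len(match_list):
--                     match_list.append([])
--                 match_list[idx].append(val)
--     combos = [()]
--     for options in match_list:
--         combos = [t + (u,) for t in combos for u in options if u not in t]
--     return len({tuple(sorted(t)) for t in combos})
-- ===== Notes on version B (the rewrite author's own statement) =====
-- stated objective: idiomatic
-- what changed: make_res's recursive DFS with per-leaf linear scan of res_list is replaced by an iterative level-by-level Cartesian-product fold over distinct tuples plus one set-comprehension dedup on canonical sorted tuples; the match_list builder loop is kept verbatim (including its IndexError on a non-trailing pattern with no match, which B raises identically, so Pre_ excludes only inputs where both raise).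
import Mathlib
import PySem

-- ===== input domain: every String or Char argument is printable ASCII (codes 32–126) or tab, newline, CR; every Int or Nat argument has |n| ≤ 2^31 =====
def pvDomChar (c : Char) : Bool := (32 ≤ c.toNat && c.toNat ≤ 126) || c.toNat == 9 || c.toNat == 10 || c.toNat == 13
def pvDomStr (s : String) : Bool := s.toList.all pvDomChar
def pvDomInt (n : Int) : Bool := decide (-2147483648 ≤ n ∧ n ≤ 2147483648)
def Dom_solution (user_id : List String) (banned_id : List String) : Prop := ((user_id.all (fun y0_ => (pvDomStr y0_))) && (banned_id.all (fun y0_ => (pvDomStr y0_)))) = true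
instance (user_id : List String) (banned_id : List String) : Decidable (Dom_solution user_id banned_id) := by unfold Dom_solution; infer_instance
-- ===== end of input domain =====

-- B replaces make_res's recursive DFS + linear-scan dedup of result sets by an iterative
-- Cartesian-product fold over distinct tuples deduplicated via a set of sorted tuples (idiomatic).


-- ===== PORT A =====

def isMatch (t_id pattern : String) : Bool :=
  let tl := t_id.toList
  let pl := pattern.toList
  let l : Int := tl.length
  if l != (pl.length : Int) then false
  else (PySem.List.pyRange 0 l 1).all (fun i =>
    if PySem.List.pyGetD pl i ' ' == '*' then true
    else PySem.List.pyGetD tl i ' ' == PySem.List.pyGetD pl i ' ')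

-- inner 'for val in user_id' of A's match_list builder; none = IndexError of match_list[idx]
def buildRow (idx : Int) (b : String) : List String → List (List String) → Option (List (List String))
  | [], ml => some ml
  | val :: us, ml =>
      if isMatch val b then
        let ml1 := if idx ≥ (ml.length : Int) then ml ++ [[]] else ml
        match PySem.List.pyGet? ml1 idx with
        | none => none
        | some cur =>
            match PySem.List.pySet? ml1 idx (cur ++ [val]) with
            | none => none
            | some ml2 => buildRow idx b us ml2
      else buildRow idx b us ml

-- outer 'for idx, b in enumerate(banned_id)' of A's builder
def buildMatchList (user_id : List String) : List (Int × String) → List (List String) → Option (List (List String))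
  | [], ml => some ml
  | (idx, b) :: rest, ml =>
      match buildRow idx b user_id ml with
      | none => none
      | some ml' => buildMatchList user_id rest ml'

mutual
-- make_res: res_list threaded as state, returned
def makeRes (m : List (List String)) (depth : Nat) (resSet : PySem.Set String)
    (resList : List (PySem.Set String)) : List (PySem.Set String) :=
  if h : depth ≥ m.length then
    if resList.any (fun r => PySem.Set.equal r resSet) then resList else resList ++ [resSet]
  else
    makeResLoop m depth resSet (m.getD depth []) resList (by omega)
termination_by (m.length - depth, (m.getD depth []).length + 1)
decreasing_by exact Prod.Lex.right _ (by omega)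

-- 'for ele in m_list[depth_idx]' of make_res
def makeResLoop (m : List (List String)) (depth : Nat) (resSet : PySem.Set String)
    (elems : List String) (resList : List (PySem.Set String)) (h : depth < m.length) :
    List (PySem.Set String) :=
  match elems with
  | [] => resList
  | ele :: rest =>
      let rs := if depth < 1 then PySem.Set.empty else resSet
      if PySem.Set.contains rs ele then makeResLoop m depth resSet rest resList h
      else makeResLoop m depth resSet rest (makeRes m (depth + 1) (PySem.Set.add rs ele) resList) h
termination_by (m.length - depth, elems.length)
decreasing_by
  · exact Prod.Lex.right _ (by simp [List.length_cons])
  · exact Prod.Lex.left _ _ (by omega)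
  · exact Prod.Lex.right _ (by simp [List.length_cons])
end

def solution (user_id : List String) (banned_id : List String) : Int :=
  match buildMatchList user_id (PySem.List.enumerate banned_id) [] with
  | none => 0   -- Python A raises IndexError here; excluded by Pre_solution
  | some ml => ((makeRes ml 0 PySem.Set.empty []).length : Int)

-- ===== PORT B =====

def isMatchAlt (t_id pattern : String) : Bool :=
  (decide (t_id.toList.length = pattern.toList.length)) &&
    (t_id.toList.zip pattern.toList).all (fun cp => cp.2 == '*' || cp.1 == cp.2)

-- B keeps A's builder loop verbatim (Source B), so it is transcribed again here with B's is_match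
def buildRowAlt (idx : Int) (b : String) : List String → List (List String) → Option (List (List String))
  | [], ml => some ml
  | val :: us, ml =>
      if isMatchAlt val b then
        let ml1 := if idx ≥ (ml.length : Int) then ml ++ [[]] else ml
        match PySem.List.pyGet? ml1 idx with
        | none => none
        | some cur =>
            match PySem.List.pySet? ml1 idx (cur ++ [val]) with
            | none => none
            | some ml2 => buildRowAlt idx b us ml2
      else buildRowAlt idx b us ml

def buildMatchListAlt (user_id : List String) : List (Int × String) → List (List String) → Option (List (List String))
  | [], ml => some ml
  | (idx, b) :: rest, ml =>
      match buildRowAlt idx b user_id ml with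
      | none => none
      | some ml' => buildMatchListAlt user_id rest ml'

def solution_alt (user_id : List String) (banned_id : List String) : Int :=
  match buildMatchListAlt user_id (PySem.List.enumerate banned_id) [] with
  | none => 0   -- Python B raises IndexError here too; excluded by Pre_solution
  | some ml =>
      let combos := ml.foldl
        (fun cs options =>
          cs.flatMap (fun t => (options.filter (fun u => !t.contains u)).map (fun u => t ++ [u])))
        [[]]
      ((PySem.Set.ofList (combos.map (fun t => PySem.List.sorted t (fun x => x) false))).length : Int)

-- ===== PRECONDITION & SPEC =====

-- matching predicate for Pre_ (independent of both ports)
def pvMatches (u p : String) : Bool :=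
  (decide (u.toList.length = p.toList.length)) &&
    (u.toList.zip p.toList).all (fun cp => cp.2 == '*' || cp.1 == cp.2)

-- Pre_ excludes exactly the inputs on which BOTH Pythons raise IndexError: those where some
-- banned pattern matches no user while a later pattern matches one (the matched patterns must
-- form a prefix of banned_id, i.e. the per-pattern 'has a match' flags are nonincreasing).
def Pre_solution (user_id : List String) (banned_id : List String) : Prop :=
  ((banned_id.map (fun p => user_id.any (fun u => pvMatches u p))).Pairwise
    (fun a b => b = true → a = true))
instance (user_id : List String) (banned_id : List String) : Decidable (Pre_solution user_id banned_id) := by unfold Pre_solution; infer_instance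

def pvWitness_solution : List String × List String := (["frodo", "abc123"], ["fr*d*", "abc1**"])

def Spec_solution (user_id : List String) (banned_id : List String) (out : Int) : Prop := out = solution_alt user_id banned_id
instance (user_id : List String) (banned_id : List String) (out : Int) : Decidable (Spec_solution user_id banned_id out) := by unfold Spec_solution; infer_instance

-- ===== CLAIM (what is proved, stated in full; the proofs are below) =====
def Claim_equal_solution : Prop := ∀ (user_id : List String) (banned_id : List String), Dom_solution user_id banned_id → Pre_solution user_id banned_id → Spec_solution user_id banned_id (solution user_id banned_id)

-- ===== LEMMAS AND PROOFS =====

-- proof-only helpers: canonical form of a tuple, A's leaf dedup step, the DFS leaf list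
def srt (t : List String) : List String := PySem.List.sorted t (fun x => x) false

def dedupIns (acc : List (List String)) (s : List String) : List (List String) :=
  if acc.any (fun r => PySem.Set.equal r s) then acc else acc ++ [s]

def leafs : List (List String) → List String → List (List String)
  | [], rs => [rs]
  | opts :: rest, rs =>
      opts.flatMap (fun e => if rs.contains e then [] else leafs rest (rs ++ [e]))

-- A's indexed matching loop = B's zip form
lemma all_idx_zip {α β : Type} (g : α → β → Bool) (d1 : α) (d2 : β) :
    ∀ (a : List α) (b : List β), a.length = b.length →
      ((List.range a.length).all (fun k => g (a.getD k d1) (b.getD k d2)) =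
        (a.zip b).all (fun cp => g cp.1 cp.2)) := by
  intro a
  induction a with
  | nil => intro b h; simp
  | cons x a' ih =>
      intro b h
      cases b with
      | nil => simp at h
      | cons y b' =>
          simp only [List.length_cons, List.range_succ_eq_map, List.all_cons, List.all_map,
            List.zip_cons_cons, List.getD_cons_zero]
          have hf : ((fun k => g ((x :: a').getD k d1) ((y :: b').getD k d2)) ∘ Nat.succ) =
              (fun k => g (a'.getD k d1) (b'.getD k d2)) := by funext k; simp
          rw [hf, ih b' (by simpa using h)]

lemma isMatch_eq (t p : String) : isMatch t p = isMatchAlt t p := by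
  unfold isMatch isMatchAlt
  dsimp only
  by_cases h : t.toList.length = p.toList.length
  · simp only [h, bne_self_eq_false, Bool.false_eq_true, if_false,
      decide_true, Bool.true_and]
    rw [PySem.List.pyRange_zero_nat, List.all_map]
    have hf : ((fun i => if (PySem.List.pyGetD p.toList i ' ' == '*') = true then true
          else PySem.List.pyGetD t.toList i ' ' == PySem.List.pyGetD p.toList i ' ') ∘
            (fun (k : Nat) => (k : Int))) =
        (fun k => (fun (c : Char) (q : Char) => if q == '*' then true else c == q)
          (t.toList.getD k ' ') (p.toList.getD k ' ')) := by
      funext k; simp [PySem.List.pyGetD_natCast]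
    rw [← h, hf]
    refine (all_idx_zip (fun (c : Char) (q : Char) => if q == '*' then true else c == q) ' ' ' ' t.toList p.toList h).trans ?_
    refine List.all_congr rfl fun cp => ?_
    by_cases h2 : cp.2 = '*' <;> simp [h2]
  · have hb : ((t.toList.length : Int) != (p.toList.length : Int)) = true := by
      simp only [bne_iff_ne, ne_eq]
      intro hh; exact h (by exact_mod_cast hh)
    have hd : decide (t.toList.length = p.toList.length) = false := decide_eq_false h
    rw [hb, hd]
    simp

lemma buildRow_eq (idx : Int) (b : String) :
    ∀ (us : List String) (ml : List (List String)),
      buildRow idx b us ml = buildRowAlt idx b us ml := by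
  intro us
  induction us with
  | nil => intro ml; rfl
  | cons v us ih =>
      intro ml
      rw [buildRow, buildRowAlt, isMatch_eq]
      by_cases h : isMatchAlt v b
      · simp only [h, if_true]
        cases PySem.List.pyGet? (if idx ≥ ((ml.length : Int)) then ml ++ [[]] else ml) idx with
        | none => rfl
        | some cur =>
            simp only
            cases PySem.List.pySet? (if idx ≥ ((ml.length : Int)) then ml ++ [[]] else ml) idx
              (cur ++ [v]) with
            | none => rfl
            | some ml2 => simp only; exact ih ml2
      · simp only [h]; exact ih ml

lemma buildMatchList_eq (uid : List String) :
    ∀ (pairs : List (Int × String)) (ml : List (List String)),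
      buildMatchList uid pairs ml = buildMatchListAlt uid pairs ml := by
  intro pairs
  induction pairs with
  | nil => intro ml; rfl
  | cons p rest ih =>
      intro ml
      obtain ⟨idx, b⟩ := p
      rw [buildMatchList, buildMatchListAlt, buildRow_eq]
      cases buildRowAlt idx b uid ml with
      | none => rfl
      | some ml' => exact ih ml'

-- filter-then-map under flatMap = the guarded flatMap of the DFS
lemma flatMap_filter_map {α β γ : Type} (p : α → Bool) (g : α → β) (h : β → List γ) :
    ∀ (opts : List α),
      (((opts.filter p).map g).flatMap fun x => h x) =
        opts.flatMap (fun e => if p e then (h (g e)) else []) := by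
  intro opts
  induction opts with
  | nil => rfl
  | cons e rest ih =>
      by_cases hp : p e
      · simp only [List.filter_cons, hp, if_true, List.map_cons, List.flatMap_cons, ih]
      · simp only [List.filter_cons, hp, Bool.false_eq_true, if_false, List.flatMap_cons, ih]
        simp

-- B's product fold computes the DFS leaf list
lemma foldl_step_eq :
    ∀ (rest : List (List String)) (cs : List (List String)),
      rest.foldl
        (fun cs options =>
          cs.flatMap (fun t => (options.filter (fun u => !t.contains u)).map (fun u => t ++ [u])))
        cs = cs.flatMap (fun t => leafs rest t) := by
  intro rest
  induction rest with
  | nil => intro cs; simp [leafs]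
  | cons opts rest ih =>
      intro cs
      rw [List.foldl_cons, ih, List.flatMap_assoc]
      congr 1
      funext t
      rw [flatMap_filter_map (fun u => !t.contains u) (fun u => t ++ [u])
        (fun t' => leafs rest t') opts, leafs]
      congr 1
      funext e
      cases t.contains e <;> simp

-- make_res = fold of dedupIns over the DFS leaf list
lemma makeRes_eq :
    ∀ (k : Nat) (m : List (List String)) (depth : Nat), m.length - depth ≤ k →
      ∀ (rs : PySem.Set String) (acc : List (PySem.Set String)), (depth = 0 → rs = []) →
        makeRes m depth rs acc = (leafs (m.drop depth) rs).foldl dedupIns acc := by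
  intro k
  induction k with
  | zero =>
      intro m depth hk rs acc h0
      have hd : m.length ≤ depth := by omega
      rw [makeRes, dif_pos (by omega)]
      rw [List.drop_eq_nil_of_le hd, leafs]
      simp [dedupIns]
  | succ k ih =>
      intro m depth hk rs acc h0
      by_cases hd : m.length ≤ depth
      · rw [makeRes, dif_pos (by omega)]
        rw [List.drop_eq_nil_of_le hd, leafs]
        simp [dedupIns]
      · have hlt : depth < m.length := by omega
        rw [makeRes, dif_neg (by omega)]
        have inner : ∀ (elems : List String) (acc : List (PySem.Set String)),
            makeResLoop m depth rs elems acc hlt =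
              (elems.flatMap (fun e => if rs.contains e then [] else
                leafs (m.drop (depth + 1)) (rs ++ [e]))).foldl dedupIns acc := by
          intro elems
          induction elems with
          | nil => intro acc; rw [makeResLoop]; simp
          | cons e restE ihe =>
              intro acc
              rw [makeResLoop]
              have hrs : (if depth < 1 then PySem.Set.empty else rs) = rs := by
                by_cases h1 : depth < 1
                · rw [if_pos h1, h0 (by omega)]; rfl
                · rw [if_neg h1]
              rw [hrs]
              by_cases hc : PySem.Set.contains rs e = true
              · rw [if_pos hc, ihe]
                have hm : e ∈ rs := by
                  simpa [PySem.Set.contains_eq_listContains, List.contains_eq_mem] using hc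
                simp [List.flatMap_cons, hm]
              · rw [if_neg hc]
                have hnm : e ∉ rs := by
                  simpa [PySem.Set.contains_eq_listContains, List.contains_eq_mem] using hc
                rw [ihe,
                  ih m (depth + 1) (by omega) (PySem.Set.add rs e) acc (by omega),
                  PySem.Set.add_of_not_mem hnm]
                simp [List.flatMap_cons, hnm, List.foldl_append]
        rw [inner (m.getD depth []) acc,
          List.getD_eq_getElem m [] hlt,
          List.drop_eq_getElem_cons hlt, leafs]
        simp [List.contains_eq_mem]

lemma leafs_nodup :
    ∀ (rest : List (List String)) (rs : List String), rs.Nodup →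
      ∀ t ∈ leafs rest rs, t.Nodup := by
  intro rest
  induction rest with
  | nil =>
      intro rs h t ht
      simp only [leafs, List.mem_singleton] at ht
      exact ht ▸ h
  | cons opts rest ih =>
      intro rs h t ht
      rw [leafs, List.mem_flatMap] at ht
      obtain ⟨e, _, ht⟩ := ht
      by_cases hc : rs.contains e = true
      · have hm : e ∈ rs := by simpa [List.contains_eq_mem] using hc
        simp [hm] at ht
      · simp only [hc, Bool.false_eq_true, if_false] at ht
        have hnm : e ∉ rs := by simpa [List.contains_eq_mem] using hc
        refine ih (rs ++ [e]) ?_ t ht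
        simp [List.nodup_append, h]
        exact fun a ha he => hnm (he ▸ ha)

lemma equal_iff_srt_eq (r s : List String) (hr : r.Nodup) (hs : s.Nodup) :
    PySem.Set.equal r s = true ↔ srt r = srt s := by
  unfold srt
  rw [PySem.Set.equal_iff, PySem.List.sorted_id_eq_sorted_id_iff_perm]
  constructor
  · intro hx
    exact (List.perm_ext_iff_of_nodup hr hs).2 fun x => hx x
  · intro hp x
    exact hp.mem_iff

lemma count_eq :
    ∀ (L : List (List String)), (∀ t ∈ L, t.Nodup) →
      ∀ (acc : List (List String)), (∀ s ∈ acc, s.Nodup) →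
        (L.foldl dedupIns acc).map srt =
          (L.map srt).foldl PySem.Set.add (acc.map srt) := by
  intro L
  induction L with
  | nil => intro _ acc _; simp
  | cons s L ihL =>
      intro hL acc hacc
      have hs : s.Nodup := hL s List.mem_cons_self
      have key : (acc.any fun r => PySem.Set.equal r s) = true ↔ srt s ∈ acc.map srt := by
        simp only [List.any_eq_true, List.mem_map]
        constructor
        · rintro ⟨r, hr, he⟩
          exact ⟨r, hr, (equal_iff_srt_eq r s (hacc r hr) hs).1 he⟩
        · rintro ⟨r, hr, he⟩
          exact ⟨r, hr, (equal_iff_srt_eq r s (hacc r hr) hs).2 he⟩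
      rw [List.foldl_cons, List.map_cons, List.foldl_cons]
      by_cases hmem : (acc.any fun r => PySem.Set.equal r s) = true
      · rw [show dedupIns acc s = acc by unfold dedupIns; rw [if_pos hmem],
          PySem.Set.add_of_mem (key.1 hmem)]
        exact ihL (fun t ht => hL t (List.mem_cons_of_mem s ht)) acc hacc
      · rw [show dedupIns acc s = acc ++ [s] by unfold dedupIns; rw [if_neg hmem],
          PySem.Set.add_of_not_mem (fun hm => hmem (key.2 hm))]
        rw [ihL (fun t ht => hL t (List.mem_cons_of_mem s ht)) (acc ++ [s])
          (by intro x hx; rcases List.mem_append.1 hx with h | h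
              · exact hacc x h
              · simp at h; exact h ▸ hs)]
        simp

theorem solution_spec : Claim_equal_solution := by
  unfold Claim_equal_solution
  intro uid bid _ _
  unfold Spec_solution solution solution_alt
  rw [buildMatchList_eq]
  cases hml : buildMatchListAlt uid (PySem.List.enumerate bid) [] with
  | none => rfl
  | some ml =>
      dsimp only
      rw [foldl_step_eq ml [[]]]
      have hcombos : ([[]] : List (List String)).flatMap (fun t => leafs ml t) = leafs ml [] := by
        simp
      rw [hcombos]
      rw [makeRes_eq ml.length ml 0 (by omega) PySem.Set.empty [] (fun _ => rfl)]
      rw [List.drop_zero]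
      have hsrt : (fun (t : List String) => PySem.List.sorted t (fun x => x) false) = srt := rfl
      rw [hsrt]
      have hnod := leafs_nodup ml [] List.nodup_nil
      have hcount := count_eq (leafs ml []) hnod [] (by intro s hs; simp at hs)
      simp only [List.map_nil] at hcount
      rw [PySem.Set.ofList_eq_foldl, ← hcount]
      simp
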